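-- pv_equiv track=rewrite | github.com/ruslano69/codeSignal | Arcade/theCore/replaceMiddle.py | replaceMiddle
-- ===== SOURCE A (Python) =====
-- def replaceMiddle(arr):
--     if len(arr) % 2 == 0:
--         ans = []
--         for i in range(len(arr)):
--             if i == len(arr)//2-1:
--                 ans.append(arr[len(arr)//2-1]+arr[len(arr)//2])
--             elif i == len(arr)//2:
--                 continue
--             else:
--                 ans.append(arr[i])
--         return ans
--     else:
--         return arr
-- ===== SOURCE B (Python) =====
-- def replaceMiddle(arr):
--     if len(arr) % 2 == 1:
--         return arr
--     if not arr:
--         return arr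
--     m = len(arr) // 2
--     return arr[:m-1] + [arr[m-1] + arr[m]] + arr[m+1:]
-- ===== Notes on version B (the rewrite author's own statement) =====
-- stated objective: simpler
-- what changed: Replaces the index loop with skip/continue branches by direct slice concatenation arr[:m-1] + [arr[m-1]+arr[m]] + arr[m+1:], with an explicit empty-list case.
import Mathlib
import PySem

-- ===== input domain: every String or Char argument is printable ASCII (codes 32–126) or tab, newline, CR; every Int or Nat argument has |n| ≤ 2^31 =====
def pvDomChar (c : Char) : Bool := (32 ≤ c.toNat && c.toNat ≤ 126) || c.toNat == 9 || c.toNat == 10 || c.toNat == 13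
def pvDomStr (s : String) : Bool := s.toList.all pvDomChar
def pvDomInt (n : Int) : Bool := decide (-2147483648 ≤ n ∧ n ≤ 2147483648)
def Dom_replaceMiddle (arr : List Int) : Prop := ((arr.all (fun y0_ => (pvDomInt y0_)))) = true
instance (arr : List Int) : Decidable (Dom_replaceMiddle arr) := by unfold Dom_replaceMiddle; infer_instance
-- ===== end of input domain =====

-- B replaces A's index loop with skip/continue branches by slice concatenation (objective: simpler).

-- ===== PORT A =====
def replaceMiddle (arr : List Int) : List Int :=
  if (arr.length : Int) % 2 == 0 then
    (PySem.List.pyRange 0 (arr.length : Int) 1).foldl (fun ans i =>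
      if i == PySem.Int.floordiv (arr.length : Int) 2 - 1 then
        ans ++ [PySem.List.pyGetD arr (PySem.Int.floordiv (arr.length : Int) 2 - 1) 0
                + PySem.List.pyGetD arr (PySem.Int.floordiv (arr.length : Int) 2) 0]
      else if i == PySem.Int.floordiv (arr.length : Int) 2 then
        ans
      else
        ans ++ [PySem.List.pyGetD arr i 0]) []
  else
    arr

-- ===== PORT B =====
def replaceMiddle_alt (arr : List Int) : List Int :=
  if (arr.length : Int) % 2 == 1 then
    arr
  else if arr = [] then
    arr
  else
    let m : Int := PySem.Int.floordiv (arr.length : Int) 2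
    PySem.List.slice arr none (some (m - 1))
      ++ [PySem.List.pyGetD arr (m - 1) 0 + PySem.List.pyGetD arr m 0]
      ++ PySem.List.slice arr (some (m + 1)) none

-- ===== PRECONDITION & SPEC =====
def Spec_replaceMiddle (arr : List Int) (out : List Int) : Prop := out = replaceMiddle_alt arr
instance (arr : List Int) (out : List Int) : Decidable (Spec_replaceMiddle arr out) := by unfold Spec_replaceMiddle; infer_instance

-- ===== CLAIM (what is proved, stated in full; the proofs are below) =====
def Claim_equal_replaceMiddle : Prop := ∀ (arr : List Int), Dom_replaceMiddle arr → Spec_replaceMiddle arr (replaceMiddle arr)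

-- ===== LEMMAS AND PROOFS =====

-- mapping an in-bounds element lookup over a range of indices yields a contiguous segment
theorem map_pyGetD_pyRange_seg (arr : List Int) (a b : Int)
    (ha : 0 ≤ a) (hb : b ≤ (arr.length : Int)) :
    (PySem.List.pyRange a b 1).map (fun i => PySem.List.pyGetD arr i 0)
      = (arr.drop a.toNat).take (b - a).toNat := by
  apply List.ext_getElem
  · simp [PySem.List.length_pyRange_one]
    omega
  · intro k h1 h2
    simp only [List.getElem_map]
    rw [PySem.List.getElem_pyRange_one]
    have hk : (k : Int) < b - a := by
      simp [PySem.List.length_pyRange_one] at h1; omega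
    rw [PySem.List.pyGetD_eq_getElem arr 0 (by omega) (by omega)]
    simp only [List.getElem_take, List.getElem_drop]
    congr 1
    omega

theorem replaceMiddle_eq_alt (arr : List Int) : replaceMiddle arr = replaceMiddle_alt arr := by
  unfold replaceMiddle replaceMiddle_alt
  rcases Nat.even_or_odd arr.length with he | ho
  · obtain ⟨mN, hm⟩ := he
    have h2 : ((arr.length : Int) % 2 == 0) = true := by simp; omega
    have h2' : ((arr.length : Int) % 2 == 1) = false := by simp; omega
    rw [h2, h2']
    simp only [if_true, if_false, Bool.false_eq_true]
    by_cases hnil : arr = []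
    · subst hnil
      simp [PySem.List.pyRange_one_eq_nil]
    · rw [if_neg hnil]
      have hlen : arr.length = 2 * mN := by omega
      have hm1 : 1 ≤ mN := by
        by_contra h
        exact hnil (List.length_eq_zero_iff.mp (by omega))
      have hM : PySem.Int.floordiv (arr.length : Int) 2 = (mN : Int) := by
        rw [show ((2:Int)) = ((2:Nat):Int) by norm_num, PySem.Int.floordiv_natCast]
        congr 1; omega
      rw [hM]
      have hs1 : PySem.List.pyRange ((mN:Int)-1) ((mN:Int)) 1 = [((mN:Int)-1)] := by
        have := PySem.List.pyRange_one_singleton ((mN:Int)-1)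
        rw [show ((mN:Int)-1)+1 = (mN:Int) by ring] at this
        exact this
      have hs2 : PySem.List.pyRange ((mN:Int)) ((mN:Int)+1) 1 = [((mN:Int))] :=
        PySem.List.pyRange_one_singleton _
      have hsplit : PySem.List.pyRange 0 (arr.length : Int) 1
          = PySem.List.pyRange 0 ((mN:Int) - 1) 1 ++ [((mN:Int) - 1)] ++ [(mN:Int)]
            ++ PySem.List.pyRange ((mN:Int)+1) (arr.length : Int) 1 := by
        rw [PySem.List.pyRange_one_append 0 ((mN:Int)-1) (arr.length:Int) (by omega) (by omega),
            PySem.List.pyRange_one_append ((mN:Int)-1) ((mN:Int)) (arr.length:Int) (by omega) (by omega),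
            PySem.List.pyRange_one_append ((mN:Int)) ((mN:Int)+1) (arr.length:Int) (by omega) (by omega),
            hs1, hs2]
        simp [List.append_assoc]
      rw [hsplit]
      simp only [List.foldl_append, List.foldl_cons, List.foldl_nil]
      rw [PySem.List.foldl_congr_mem _ _ (fun ans i => ans ++ [PySem.List.pyGetD arr i 0]) _ ?hseg1]
      case hseg1 =>
        intro acc x hx
        rw [PySem.List.mem_pyRange_one] at hx
        rw [if_neg (by simp; omega), if_neg (by simp; omega)]
      rw [PySem.List.foldl_append_singleton_eq_map]
      have e1 : (((mN:Int) - 1) == ((mN:Int) - 1)) = true := by simp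
      have e2 : (((mN:Int)) == ((mN:Int) - 1)) = false := by simp; omega
      have e3 : (((mN:Int)) == ((mN:Int))) = true := by simp
      simp only [e1, e2, e3, if_true, Bool.false_eq_true, if_false]
      rw [PySem.List.foldl_congr_mem _ _ (fun ans i => ans ++ [PySem.List.pyGetD arr i 0]) _ ?hseg2]
      case hseg2 =>
        intro acc x hx
        rw [PySem.List.mem_pyRange_one] at hx
        rw [if_neg (by simp; omega), if_neg (by simp; omega)]
      rw [PySem.List.foldl_append_singleton_eq_map]
      rw [map_pyGetD_pyRange_seg arr 0 ((mN:Int)-1) (by omega) (by omega)]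
      rw [map_pyGetD_pyRange_seg arr ((mN:Int)+1) (arr.length:Int) (by omega) (by omega)]
      rw [PySem.List.slice_to arr (by omega), PySem.List.slice_from arr (by omega)]
      have hdt : (arr.drop ((mN:Int)+1).toNat).take ((arr.length:Int) - ((mN:Int)+1)).toNat
          = arr.drop ((mN:Int)+1).toNat := by
        apply List.take_of_length_le
        simp; omega
      rw [hdt]
      simp [List.append_assoc]
  · obtain ⟨k, hk⟩ := ho
    have h2 : ((arr.length : Int) % 2 == 0) = false := by simp; omega
    have h2' : ((arr.length : Int) % 2 == 1) = true := by simp; omega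
    rw [h2, h2']
    simp

-- ===== VERDICT (by name: the statement is the Claim_ definition above) =====
theorem replaceMiddle_spec : Claim_equal_replaceMiddle := by
  intro arr _
  exact replaceMiddle_eq_alt arr
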